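-- pv_equiv track=rewrite | github.com/Todeschiniii/Projetos-Tecnico | Feira 5.0/Feira 5.0/Feira/Feira/Feira/Feira/libras.py | suavizar_frame
-- ===== SOURCE A (Python) =====
-- def suavizar_frame(trajetoria):
--     nomes = trajetoria[0].keys()
--     suavizado = {}
--
--     for nome in nomes:
--         xs, ys, zs = [], [], []
--         for frame in trajetoria:
--             if nome in frame:
--                 x, y, z = frame[nome]
--                 xs.append(x)
--                 ys.append(y)
--                 zs.append(z)
--
--             if xs:
--                 suavizado[nome] = (
--                     sum(xs) // len(xs),
--                     sum(ys) // len(ys),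
--                     sum(zs) // len(zs)
--                 )
--
--     return suavizado
-- ===== SOURCE B (Python) =====
-- def suavizar_frame(trajetoria):
--     nomes = trajetoria[0].keys()
--     soma = {}
--     cont = {}
--     for frame in trajetoria:
--         for nome, (x, y, z) in frame.items():
--             if nome in nomes:
--                 sx, sy, sz = soma.get(nome, (0, 0, 0))
--                 soma[nome] = (sx + x, sy + y, sz + z)
--                 cont[nome] = cont.get(nome, 0) + 1
--     return {
--         nome: (soma[nome][0] // cont[nome],
--                soma[nome][1] // cont[nome],
--                soma[nome][2] // cont[nome])
--         for nome in nomes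
--     }
-- ===== Notes on version B (the rewrite author's own statement) =====
-- stated objective: faster
-- what changed: One pass over the frames maintaining running per-name sum and count dicts (instead of building three coordinate lists per name, rescanning all frames for each name, and recomputing sum()//len() after every frame), then one pass over the first frame's keys to emit the floor-averages in order.
-- outside the precondition, e.g. on suavizar_frame([]): A raises IndexError, B raises IndexError
import Mathlib
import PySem

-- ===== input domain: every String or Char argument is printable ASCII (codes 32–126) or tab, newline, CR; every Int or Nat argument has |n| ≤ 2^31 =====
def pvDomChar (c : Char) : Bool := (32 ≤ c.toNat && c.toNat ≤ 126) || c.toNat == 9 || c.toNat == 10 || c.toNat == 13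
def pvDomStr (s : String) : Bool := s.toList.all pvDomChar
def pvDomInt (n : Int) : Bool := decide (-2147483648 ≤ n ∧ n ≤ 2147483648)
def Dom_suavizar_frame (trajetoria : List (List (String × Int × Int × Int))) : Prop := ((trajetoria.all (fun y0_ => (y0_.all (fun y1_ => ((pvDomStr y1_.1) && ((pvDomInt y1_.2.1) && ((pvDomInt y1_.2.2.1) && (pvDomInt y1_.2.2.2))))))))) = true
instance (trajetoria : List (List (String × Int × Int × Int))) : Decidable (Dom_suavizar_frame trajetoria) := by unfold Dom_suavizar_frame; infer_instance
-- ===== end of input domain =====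

-- B replaces A's per-name rescans (with sum()//len() recomputed after every frame) by one pass
-- keeping running per-name sum and count dicts; objective: faster (asymptotically fewer additions).


-- ===== PORT A =====
-- inner 'for frame in trajetoria' body: append to xs/ys/zs if nome in frame, then 'if xs:' re-store the running average
def pvStepFrameA (nome : String)
    (st : List Int × List Int × List Int × PySem.Dict String (Int × Int × Int))
    (frame : List (String × Int × Int × Int)) :
    List Int × List Int × List Int × PySem.Dict String (Int × Int × Int) :=
  let (xs, ys, zs, suavizado) := st
  let (xs, ys, zs) :=
    match (PySem.Dict.mk frame).get? nome with
    | some (x, y, z) => (xs ++ [x], ys ++ [y], zs ++ [z])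
    | none => (xs, ys, zs)
  if xs ≠ [] then
    (xs, ys, zs, suavizado.insert nome
      (PySem.Int.floordiv xs.sum (xs.length : Int),
       PySem.Int.floordiv ys.sum (ys.length : Int),
       PySem.Int.floordiv zs.sum (zs.length : Int)))
  else (xs, ys, zs, suavizado)

def suavizar_frame (trajetoria : List (List (String × Int × Int × Int))) : List (String × Int × Int × Int) :=
  match trajetoria with
  | [] => []  -- trajetoria[0] raises IndexError in Python; excluded by Pre_
  | f0 :: _ =>
    let nomes := (PySem.Dict.mk f0).keys
    let suavizado := nomes.foldl
      (fun suavizado nome =>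
        (trajetoria.foldl (pvStepFrameA nome) ([], [], [], suavizado)).2.2.2)
      PySem.Dict.empty
    suavizado.items

-- ===== PORT B =====
-- inner 'for nome, (x, y, z) in frame.items()' body of Source B
def pvStepItemB (nomes : List String)
    (sc : PySem.Dict String (Int × Int × Int) × PySem.Dict String Int)
    (item : String × Int × Int × Int) :
    PySem.Dict String (Int × Int × Int) × PySem.Dict String Int :=
  let (soma, cont) := sc
  let (nome, x, y, z) := item
  if nomes.contains nome then
    let (sx, sy, sz) := soma.getD nome (0, 0, 0)
    (soma.insert nome (sx + x, sy + y, sz + z), cont.insert nome (cont.getD nome 0 + 1))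
  else sc

def suavizar_frame_alt (trajetoria : List (List (String × Int × Int × Int))) : List (String × Int × Int × Int) :=
  match trajetoria with
  | [] => []  -- trajetoria[0] raises IndexError in Python; excluded by Pre_
  | f0 :: _ =>
    let nomes := (PySem.Dict.mk f0).keys
    let sc := trajetoria.foldl
      (fun sc frame => frame.foldl (pvStepItemB nomes) sc)
      (PySem.Dict.empty, PySem.Dict.empty)
    nomes.map (fun nome =>
      let (sx, sy, sz) := sc.1.getD nome (0, 0, 0)
      let c := sc.2.getD nome 0
      (nome, PySem.Int.floordiv sx c, PySem.Int.floordiv sy c, PySem.Int.floordiv sz c))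

-- ===== PRECONDITION & SPEC =====
-- Pre_ excludes the empty list (trajetoria[0] raises IndexError) and association lists with a
-- duplicated key inside one frame, which do not represent Python dicts (the inputs are dicts).
def Pre_suavizar_frame (trajetoria : List (List (String × Int × Int × Int))) : Prop :=
  trajetoria ≠ [] ∧ ∀ f ∈ trajetoria, (f.map Prod.fst).Nodup
instance (trajetoria : List (List (String × Int × Int × Int))) : Decidable (Pre_suavizar_frame trajetoria) := by unfold Pre_suavizar_frame; infer_instance

def pvWitness_suavizar_frame : (List (List (String × Int × Int × Int))) :=
  [[("a", 1, 2, 3), ("b", 10, 0, 0)], [("a", 4, 5, 7)]]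

def Spec_suavizar_frame (trajetoria : List (List (String × Int × Int × Int))) (out : List (String × Int × Int × Int)) : Prop := out = suavizar_frame_alt trajetoria
instance (trajetoria : List (List (String × Int × Int × Int))) (out : List (String × Int × Int × Int)) : Decidable (Spec_suavizar_frame trajetoria out) := by unfold Spec_suavizar_frame; infer_instance

-- ===== CLAIM (what is proved, stated in full; the proofs are below) =====
def Claim_equal_suavizar_frame : Prop := ∀ (trajetoria : List (List (String × Int × Int × Int))), Dom_suavizar_frame trajetoria → Pre_suavizar_frame trajetoria → Spec_suavizar_frame trajetoria (suavizar_frame trajetoria)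

-- ===== LEMMAS AND PROOFS =====

-- the coordinate triples of the frames that contain `nome`, in frame order
def pvOcc (nome : String) (frames : List (List (String × Int × Int × Int))) : List (Int × Int × Int) :=
  frames.filterMap (fun f => (PySem.Dict.mk f).get? nome)

def pvAvg (xs : List Int) : Int := PySem.Int.floordiv xs.sum (xs.length : Int)

-- the value both programs store for `nome`
def pvVal (nome : String) (traj : List (List (String × Int × Int × Int))) : Int × Int × Int :=
  (pvAvg ((pvOcc nome traj).map (·.1)),
   pvAvg ((pvOcc nome traj).map (·.2.1)),
   pvAvg ((pvOcc nome traj).map (·.2.2)))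

def pvAdd3 (a b : Int × Int × Int) : Int × Int × Int := (a.1 + b.1, a.2.1 + b.2.1, a.2.2 + b.2.2)

def pvSum3 (L : List (Int × Int × Int)) : Int × Int × Int :=
  ((L.map (·.1)).sum, (L.map (·.2.1)).sum, (L.map (·.2.2)).sum)

lemma A_inner (nome : String) (frames : List (List (String × Int × Int × Int)))
    (xs ys zs : List Int) (d : PySem.Dict String (Int × Int × Int)) :
    frames.foldl (pvStepFrameA nome) (xs, ys, zs, d)
    = (xs ++ (pvOcc nome frames).map (·.1),
       ys ++ (pvOcc nome frames).map (·.2.1),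
       zs ++ (pvOcc nome frames).map (·.2.2),
       if frames = [] ∨ xs ++ (pvOcc nome frames).map (·.1) = [] then d
       else d.insert nome
         (pvAvg (xs ++ (pvOcc nome frames).map (·.1)),
          pvAvg (ys ++ (pvOcc nome frames).map (·.2.1)),
          pvAvg (zs ++ (pvOcc nome frames).map (·.2.2)))) := by
  induction frames generalizing xs ys zs d with
  | nil => simp [pvOcc]
  | cons f rest ih =>
    simp only [List.foldl_cons]
    rcases hg : (PySem.Dict.mk f).get? nome with _ | ⟨x, y, z⟩
    · by_cases hxs : xs = []
      · subst hxs
        simp only [pvStepFrameA, hg, ne_eq, not_true_eq_false, if_false]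
        rw [ih]
        by_cases hr : rest = [] <;>
          simp [pvOcc, hg, hr, pvAvg]
      · simp only [pvStepFrameA, hg, ne_eq, hxs, not_false_eq_true, if_true]
        rw [ih]
        by_cases hr : rest = [] <;>
          simp [pvOcc, hg, hr, hxs, pvAvg, PySem.Dict.insert_insert_self]
    · simp only [pvStepFrameA, hg]
      rw [ih]
      by_cases hr : rest = [] <;>
        simp [pvOcc, hg, hr, pvAvg, PySem.Dict.insert_insert_self]


lemma B_frame (nomes : List String) (f : List (String × Int × Int × Int))
    (hnd : (f.map Prod.fst).Nodup)
    (soma : PySem.Dict String (Int × Int × Int)) (cont : PySem.Dict String Int) (n : String) :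
    ((f.foldl (pvStepItemB nomes) (soma, cont)).1.getD n (0, 0, 0),
     (f.foldl (pvStepItemB nomes) (soma, cont)).2.getD n 0)
    = match (if nomes.contains n then (PySem.Dict.mk f).get? n else none) with
      | some v => (pvAdd3 (soma.getD n (0, 0, 0)) v, cont.getD n 0 + 1)
      | none => (soma.getD n (0, 0, 0), cont.getD n 0) := by
  induction f generalizing soma cont with
  | nil => cases h : nomes.contains n <;> simp [PySem.Dict.get?]
  | cons kv rest ih =>
    obtain ⟨k, x, y, z⟩ := kv
    simp only [List.map_cons, List.nodup_cons] at hnd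
    obtain ⟨hk, hrest⟩ := hnd
    simp only [List.foldl_cons]
    by_cases hck : nomes.contains k
    · simp only [pvStepItemB, hck, if_true]
      by_cases hkn : k = n
      · subst hkn
        have hnone : (PySem.Dict.mk rest).get? k = none := by
          rw [PySem.Dict.get?_eq_none_iff_not_mem_keys]
          simpa using hk
        have hm : k ∈ nomes := List.contains_iff_mem.mp hck
        rw [ih hrest]
        simp [hnone, hm, PySem.Dict.get?_mk_cons, PySem.Dict.getD_insert_self, pvAdd3]
      · rw [ih hrest]
        have h1 : (PySem.Dict.mk ((k, x, y, z) :: rest)).get? n = (PySem.Dict.mk rest).get? n := by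
          rw [PySem.Dict.get?_mk_cons]
          simp [hkn]
        rw [h1]
        have hne : n ≠ k := Ne.symm hkn
        simp [PySem.Dict.getD_insert, hne]
    · simp only [pvStepItemB, hck]
      rw [ih hrest]
      by_cases hkn : k = n
      · subst hkn
        simp only [PySem.Dict.get?_mk_cons, BEq.rfl, if_pos]
        simp at *
        simp [hck]
      · have h1 : (PySem.Dict.mk ((k, x, y, z) :: rest)).get? n = (PySem.Dict.mk rest).get? n := by
          rw [PySem.Dict.get?_mk_cons]
          simp [hkn]
        rw [h1]
        simp


lemma B_outer (nomes : List String) (frames : List (List (String × Int × Int × Int)))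
    (soma : PySem.Dict String (Int × Int × Int)) (cont : PySem.Dict String Int) (n : String)
    (hn : nomes.contains n = true) :
    (∀ f ∈ frames, (f.map Prod.fst).Nodup) →
    ((frames.foldl (fun sc frame => frame.foldl (pvStepItemB nomes) sc) (soma, cont)).1.getD n (0, 0, 0),
     (frames.foldl (fun sc frame => frame.foldl (pvStepItemB nomes) sc) (soma, cont)).2.getD n 0)
    = (pvAdd3 (soma.getD n (0, 0, 0)) (pvSum3 (pvOcc n frames)),
       cont.getD n 0 + ((pvOcc n frames).length : Int)) := by
  induction frames generalizing soma cont with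
  | nil => intro _; simp [pvOcc, pvSum3, pvAdd3]
  | cons f rest ih =>
    intro h
    simp only [List.foldl_cons]
    have hB := B_frame nomes f (h f (by simp)) soma cont n
    simp only [hn, if_true] at hB
    rcases hsc : f.foldl (pvStepItemB nomes) (soma, cont) with ⟨S, C⟩
    rw [hsc] at hB
    rw [ih S C (fun g hg => h g (List.mem_cons_of_mem _ hg))]
    cases hq : (PySem.Dict.mk f).get? n with
    | none =>
      rw [hq] at hB
      simp only [Prod.mk.injEq] at hB
      simp [pvOcc, hq, hB.1, hB.2]
    | some v =>
      rw [hq] at hB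
      simp only [Prod.mk.injEq] at hB
      obtain ⟨h1, h2⟩ := hB
      simp [pvOcc, hq, h1, h2, pvSum3, pvAdd3]
      refine ⟨⟨by ring, by ring, by ring⟩, by ring⟩

-- ===== VERDICT (by name: the statement is the Claim_ definition above) =====
lemma pvAdd3_zero (s : Int × Int × Int) : pvAdd3 (0, 0, 0) s = s := by
  obtain ⟨a, b, c⟩ := s; simp [pvAdd3]

theorem suavizar_frame_spec : Claim_equal_suavizar_frame := by
  intro traj _ hpre
  obtain ⟨hne, hnd⟩ := hpre
  unfold Spec_suavizar_frame
  cases traj with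
  | nil => exact absurd rfl hne
  | cons f0 rest =>
    simp only [suavizar_frame, suavizar_frame_alt]
    have hA : ∀ (d : PySem.Dict String (Int × Int × Int)) (nome : String),
        nome ∈ (PySem.Dict.mk f0).keys →
        ((f0 :: rest).foldl (pvStepFrameA nome) ([], [], [], d)).2.2.2
          = d.insert nome (pvVal nome (f0 :: rest)) := by
      intro d nome hmem
      rw [A_inner]
      have hsome : (PySem.Dict.mk f0).get? nome ≠ none := fun hgn =>
        ((PySem.Dict.get?_eq_none_iff_not_mem_keys (PySem.Dict.mk f0) nome).mp hgn) hmem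
      rcases hg : (PySem.Dict.mk f0).get? nome with _ | v
      · exact absurd hg hsome
      have hocc : pvOcc nome (f0 :: rest) = v :: pvOcc nome rest := by
        simp [pvOcc, hg]
      simp [hocc, pvVal]
    rw [PySem.List.foldl_congr_mem ((PySem.Dict.mk f0).keys) _
      (fun d nome => d.insert nome (pvVal nome (f0 :: rest))) PySem.Dict.empty
      (fun acc x hx => hA acc x hx)]
    rw [PySem.Dict.items_foldl_insert_fresh ((PySem.Dict.mk f0).keys) (fun a => a)
      (fun a => pvVal a (f0 :: rest)) PySem.Dict.empty
      (fun a _ => PySem.Dict.contains_empty a)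
      (by simpa using hnd f0 (by simp))]
    simp only [show (PySem.Dict.empty : PySem.Dict String (Int × Int × Int)).items = [] from rfl,
      List.nil_append]
    refine (List.map_congr_left ?_).symm
    intro n hmem
    have hcontains : ((PySem.Dict.mk f0).keys).contains n = true :=
      List.contains_iff_mem.mpr hmem
    have hout := B_outer ((PySem.Dict.mk f0).keys) (f0 :: rest) PySem.Dict.empty PySem.Dict.empty n hcontains hnd
    simp only [PySem.Dict.getD_empty, pvAdd3_zero, Prod.mk.injEq] at hout
    obtain ⟨h1, h2⟩ := hout
    simp only [h1, h2, pvVal, pvSum3, pvAvg, Prod.mk.injEq, true_and]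
    refine ⟨?_, ?_, ?_⟩ <;> simp [List.length_map]
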